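-- pv_equiv track=rewrite | github.com/nilaypatel99/Leetcode_nilay | 3619-adjacent-increasing-subarrays-detection-ii/adjacent-increasing-subarrays-detection-ii.py | maxIncreasingSubarrays
-- ===== SOURCE A (Python) =====
-- from typing import List
--
-- def maxIncreasingSubarrays(nums: List[int]) -> int:
--     n = len(nums)
--     curr_run = 1
--     prev_run = 0
--     mx_res = 0
--     for i in range(1,n):
--         if nums[i] > nums[i-1]:
--             curr_run += 1
--         else:
--             prev_run = curr_run
--             curr_run = 1
--
--         mx_res = max(mx_res,curr_run//2)
--         mx_res = max(mx_res,min(curr_run,prev_run))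
--
--     return mx_res
-- ===== SOURCE B (Python) =====
-- from typing import List
--
-- def maxIncreasingSubarrays(nums: List[int]) -> int:
--     # B: first build the list of maximal strictly-increasing run lengths,
--     # then compute the answer from that list in a separate pass.
--     if not nums:
--         return 0
--     runs = []
--     cur = 1
--     for prev, x in zip(nums, nums[1:]):
--         if x > prev:
--             cur += 1
--         else:
--             runs.append(cur)
--             cur = 1
--     runs.append(cur)
--     best = 0
--     prev_run = 0
--     for r in runs:
--         best = max(best, r // 2, min(r, prev_run))
--         prev_run = r
--     return best
-- ===== Notes on version B (the rewrite author's own statement) =====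
-- stated objective: alternative
-- what changed: A's single stateful scan (curr_run/prev_run/mx_res updated per element) is replaced by two phases: build the explicit list of maximal strictly-increasing run lengths, then compute the answer in a separate pass over the runs, so the //2 and min/max bookkeeping is done once per run instead of once per element.
import Mathlib
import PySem

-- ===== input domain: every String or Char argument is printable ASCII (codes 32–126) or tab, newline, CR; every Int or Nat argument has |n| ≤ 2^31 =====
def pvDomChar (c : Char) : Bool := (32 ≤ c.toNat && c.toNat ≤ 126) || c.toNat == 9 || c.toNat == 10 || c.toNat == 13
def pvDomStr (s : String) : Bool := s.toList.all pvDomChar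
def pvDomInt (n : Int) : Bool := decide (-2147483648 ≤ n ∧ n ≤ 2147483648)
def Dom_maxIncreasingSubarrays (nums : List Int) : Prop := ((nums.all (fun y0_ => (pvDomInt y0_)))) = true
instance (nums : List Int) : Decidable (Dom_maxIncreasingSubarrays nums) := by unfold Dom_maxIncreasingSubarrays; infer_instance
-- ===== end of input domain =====

-- B restructures A's single stateful scan into two phases: build the list of maximal
-- strictly-increasing run lengths, then compute the answer from that list (objective: alternative).

-- ===== PORT A =====
-- A's loop over i in range(1,n) comparing nums[i] with nums[i-1], carried as a
-- structural recursion over the tail with the previous element p; same state (curr,prev,mx).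
def aLoop : Int → Int × Int × Int → List Int → Int × Int × Int
  | _, st, [] => st
  | p, (curr, prev, mx), x :: xs =>
    let curr' := if x > p then curr + 1 else 1
    let prev' := if x > p then prev else curr
    let mx1 := max mx (PySem.Int.floordiv curr' 2)
    let mx2 := max mx1 (min curr' prev')
    aLoop x (curr', prev', mx2) xs

def maxIncreasingSubarrays (nums : List Int) : Int :=
  match nums with
  | [] => 0
  | x :: xs => (aLoop x (1, 0, 0) xs).2.2

-- ===== PORT B =====
-- Source B phase 1: run lengths of the strictly-increasing maximal segments.
def bRuns : Int → Int → List Int → List Int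
  | _, cur, [] => [cur]
  | p, cur, x :: xs => if x > p then bRuns x (cur + 1) xs else cur :: bRuns x 1 xs

-- Source B phase 2: best = max(best, r // 2, min(r, prev_run)) over the runs.
def evalRuns : Int → Int → List Int → Int
  | _, best, [] => best
  | prev, best, r :: rs => evalRuns r (max (max best (PySem.Int.floordiv r 2)) (min r prev)) rs

def maxIncreasingSubarrays_alt (nums : List Int) : Int :=
  match nums with
  | [] => 0
  | x :: xs => evalRuns 0 0 (bRuns x 1 xs)

-- ===== PRECONDITION & SPEC =====
def Spec_maxIncreasingSubarrays (nums : List Int) (out : Int) : Prop := out = maxIncreasingSubarrays_alt nums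
instance (nums : List Int) (out : Int) : Decidable (Spec_maxIncreasingSubarrays nums out) := by unfold Spec_maxIncreasingSubarrays; infer_instance

-- ===== CLAIM (what is proved, stated in full; the proofs are below) =====
def Claim_equal_maxIncreasingSubarrays : Prop := ∀ (nums : List Int), Dom_maxIncreasingSubarrays nums → Spec_maxIncreasingSubarrays nums (maxIncreasingSubarrays nums)

-- ===== LEMMAS AND PROOFS =====

-- evalRuns only ever takes maxes with its accumulator, so a max in the seed commutes out.
theorem evalRuns_max (rs : List Int) : ∀ (prev mx a : Int),
    evalRuns prev (max mx a) rs = max (evalRuns prev mx rs) a := by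
  induction rs with
  | nil => intro prev mx a; simp [evalRuns]
  | cons r rs ih =>
    intro prev mx a
    show evalRuns r (max (max (max mx a) (PySem.Int.floordiv r 2)) (min r prev)) rs = _
    have h : max (max (max mx a) (PySem.Int.floordiv r 2)) (min r prev)
        = max (max (max mx (PySem.Int.floordiv r 2)) (min r prev)) a := by
      omega
    rw [h, ih]
    rfl

-- the accumulator never decreases
theorem le_evalRuns (rs : List Int) : ∀ (prev best : Int), best ≤ evalRuns prev best rs := by
  induction rs with
  | nil => intro prev best; simp [evalRuns]
  | cons r rs ih =>
    intro prev best
    show best ≤ evalRuns r (max (max best (PySem.Int.floordiv r 2)) (min r prev)) rs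
    have := ih r (max (max best (PySem.Int.floordiv r 2)) (min r prev))
    omega

-- bRuns is nonempty and its head is at least the running count fed in
theorem bRuns_cons (xs : List Int) : ∀ (p c : Int),
    ∃ r rs, bRuns p c xs = r :: rs ∧ c ≤ r := by
  induction xs with
  | nil => intro p c; exact ⟨c, [], rfl, le_refl c⟩
  | cons x xs ih =>
    intro p c
    by_cases h : x > p
    · obtain ⟨r, rs, heq, hle⟩ := ih x (c + 1)
      exact ⟨r, rs, by simp [bRuns, h, heq], by omega⟩
    · exact ⟨c, bRuns x 1 xs, by simp [bRuns, h], le_refl c⟩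

theorem floordiv_two_mono {a b : Int} (h : a ≤ b) :
    PySem.Int.floordiv a 2 ≤ PySem.Int.floordiv b 2 := by
  rw [PySem.Int.floordiv_eq_ediv_of_pos (by omega), PySem.Int.floordiv_eq_ediv_of_pos (by omega)]
  omega

-- evalRuns dominates the head run's two contributions
theorem evalRuns_head_ge (prev mx r : Int) (rs : List Int) :
    PySem.Int.floordiv r 2 ≤ evalRuns prev mx (r :: rs) ∧
    min r prev ≤ evalRuns prev mx (r :: rs) := by
  simp only [evalRuns]
  have := le_evalRuns rs r (max (max mx (PySem.Int.floordiv r 2)) (min r prev))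
  omega

-- Main invariant: A's loop from state (curr,prev,mx), with mx already dominating the
-- current partial run's contributions, computes B's evaluation of the remaining runs.
theorem aLoop_eq (xs : List Int) : ∀ (p curr prev mx : Int),
    1 ≤ curr →
    PySem.Int.floordiv curr 2 ≤ mx →
    min curr prev ≤ mx →
    (aLoop p (curr, prev, mx) xs).2.2 = evalRuns prev mx (bRuns p curr xs) := by
  induction xs with
  | nil =>
    intro p curr prev mx h1 h2 h3
    show mx = evalRuns prev mx [curr]
    show mx = max (max mx (PySem.Int.floordiv curr 2)) (min curr prev)
    omega
  | cons x xs ih =>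
    intro p curr prev mx h1 h2 h3
    by_cases h : x > p
    · -- run continues
      have heq : aLoop p (curr, prev, mx) (x :: xs)
          = aLoop x (curr + 1, prev,
              max (max mx (PySem.Int.floordiv (curr + 1) 2)) (min (curr + 1) prev)) xs := by
        simp [aLoop, h]
      have hb : bRuns p curr (x :: xs) = bRuns x (curr + 1) xs := by simp [bRuns, h]
      rw [heq, hb]
      set mx' := max (max mx (PySem.Int.floordiv (curr + 1) 2)) (min (curr + 1) prev) with hmx'
      rw [ih x (curr + 1) prev mx' (by omega)
            (by have := le_max_left (max mx (PySem.Int.floordiv (curr + 1) 2)) (min (curr + 1) prev); omega)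
            (by omega)]
      -- absorb the two new terms: the head run of the rest is ≥ curr+1
      obtain ⟨r, rs, hrs, hle⟩ := bRuns_cons xs x (curr + 1)
      rw [hrs]
      have hm : mx' = max (max mx (PySem.Int.floordiv (curr + 1) 2)) (min (curr + 1) prev) := hmx'
      rw [hm, evalRuns_max, evalRuns_max]
      have hd := evalRuns_head_ge prev mx r rs
      have hdm : PySem.Int.floordiv (curr + 1) 2 ≤ PySem.Int.floordiv r 2 := floordiv_two_mono hle
      have hminle : min (curr + 1) prev ≤ min r prev := by omega
      simp only [evalRuns] at hd ⊢
      omega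
    · -- run breaks
      have heq : aLoop p (curr, prev, mx) (x :: xs)
          = aLoop x (1, curr,
              max (max mx (PySem.Int.floordiv 1 2)) (min 1 curr)) xs := by
        simp [aLoop, h]
      have hb : bRuns p curr (x :: xs) = curr :: bRuns x 1 xs := by simp [bRuns, h]
      rw [heq, hb]
      have hf1 : PySem.Int.floordiv (1 : Int) 2 = 0 := by decide
      show _ = evalRuns curr (max (max mx (PySem.Int.floordiv curr 2)) (min curr prev)) (bRuns x 1 xs)
      have hseed : max (max mx (PySem.Int.floordiv curr 2)) (min curr prev) = mx := by omega
      rw [hseed]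
      set mx' := max (max mx (PySem.Int.floordiv 1 2)) (min 1 curr) with hmx'
      rw [ih x 1 curr mx' (by omega) (by rw [hf1]; omega)
            (by have := le_max_right (max mx (PySem.Int.floordiv 1 2)) (min 1 curr); omega)]
      rw [hmx', hf1, evalRuns_max, evalRuns_max]
      obtain ⟨r, rs, hrs, hle⟩ := bRuns_cons xs x 1
      rw [hrs]
      have hd := evalRuns_head_ge curr mx r rs
      have hdr : (0 : Int) ≤ PySem.Int.floordiv r 2 := by
        have : PySem.Int.floordiv (1 : Int) 2 ≤ PySem.Int.floordiv r 2 := floordiv_two_mono hle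
        omega
      have hm1 : min (1 : Int) curr ≤ min r curr := by omega
      simp only [evalRuns] at hd ⊢
      omega

-- ===== VERDICT (by name: the statement is the Claim_ definition above) =====
theorem maxIncreasingSubarrays_spec : Claim_equal_maxIncreasingSubarrays := by
  intro nums _
  show maxIncreasingSubarrays nums = maxIncreasingSubarrays_alt nums
  cases nums with
  | nil => rfl
  | cons x xs =>
    show (aLoop x (1, 0, 0) xs).2.2 = evalRuns 0 0 (bRuns x 1 xs)
    exact aLoop_eq xs x 1 0 0 (by omega) (by decide) (by decide)
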